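-- pv_equiv track=rewrite | github.com/smiggiddy/2024-advent-of-code | day-2/main.py | level_safe
-- ===== SOURCE A (Python) =====
-- def level_safe(level: list):
--
--     new_list = level.copy()
--     current_level = new_list.pop(0)
--
--     if current_level < new_list[0]:
--         increasing = True
--     else:
--         increasing = False
--
--     while len(new_list) != 0:
--
--         difference = 0
--         if increasing:
--             if current_level > new_list[0]:
--                 return False
--             difference = new_list[0] - current_level
--         else:
--             if current_level < new_list[0]:
--                 return False
--             difference = current_level - new_list[0]
--
--         if abs(difference) == 0 or abs(difference) > 3:
--             return False
--
--         current_level = new_list.pop(0)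
--
--     return True
-- ===== SOURCE B (Python) =====
-- def level_safe(level: list):
--     inc = level[0] < level[1]
--     diffs = [b - a for a, b in zip(level, level[1:])]
--     if inc:
--         return all(1 <= d <= 3 for d in diffs)
--     return all(-3 <= d <= -1 for d in diffs)
-- ===== Notes on version B (the rewrite author's own statement) =====
-- stated objective: simpler
-- what changed: Replaces A's interleaved pop/direction-check/early-return while loop with a build-the-difference-table-then-uniform-range-scan decomposition: direction decided once from the first pair, then one all() over the zipped consecutive differences.
import Mathlib
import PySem

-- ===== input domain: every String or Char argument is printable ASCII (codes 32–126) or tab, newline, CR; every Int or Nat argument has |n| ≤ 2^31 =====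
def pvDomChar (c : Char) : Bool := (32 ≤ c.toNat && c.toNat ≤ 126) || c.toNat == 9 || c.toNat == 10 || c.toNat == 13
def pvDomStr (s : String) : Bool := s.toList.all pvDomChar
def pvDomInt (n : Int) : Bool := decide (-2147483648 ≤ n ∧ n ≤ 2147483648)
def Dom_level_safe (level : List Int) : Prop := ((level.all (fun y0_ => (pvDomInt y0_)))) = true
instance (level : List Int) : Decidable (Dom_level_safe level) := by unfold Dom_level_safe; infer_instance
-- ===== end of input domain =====

-- B replaces A's interleaved pop/direction-check/early-return loop with a difference-table
-- built once and a single uniform range scan (objective: simpler decomposition).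


-- ===== PORT A =====
-- the while loop: state is (increasing, current_level, new_list)
def levelSafeLoop (increasing : Bool) (current : Int) : List Int → Bool
  | [] => true
  | x :: xs =>
    if increasing then
      if current > x then false
      else
        let difference := x - current
        if difference.natAbs = 0 ∨ difference.natAbs > 3 then false
        else levelSafeLoop increasing x xs
    else
      if current < x then false
      else
        let difference := current - x
        if difference.natAbs = 0 ∨ difference.natAbs > 3 then false
        else levelSafeLoop increasing x xs

def level_safe (level : List Int) : Bool :=
  match level with
  | [] => false                      -- Python raises IndexError (pop from empty); outside Pre_
  | current :: newList =>
    match newList with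
    | [] => false                    -- Python raises IndexError (new_list[0]); outside Pre_
    | first :: _ =>
      let increasing := current < first
      levelSafeLoop increasing current newList

-- ===== PORT B =====
def level_safe_alt (level : List Int) : Bool :=
  match level with
  | a :: b :: _ =>
    let inc := a < b
    let diffs := (level.zip level.tail).map (fun p => p.2 - p.1)
    if inc then diffs.all (fun d => decide (1 ≤ d ∧ d ≤ 3))
    else diffs.all (fun d => decide (-3 ≤ d ∧ d ≤ -1))
  | _ => false                       -- Python raises IndexError (level[0] / level[1]); outside Pre_

-- ===== PRECONDITION & SPEC =====
-- A (and B) raise IndexError on lists with fewer than two elements; Pre_ excludes exactly those.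
def Pre_level_safe (level : List Int) : Prop := 2 ≤ level.length
instance (level : List Int) : Decidable (Pre_level_safe level) := by unfold Pre_level_safe; infer_instance
def pvWitness_level_safe : List Int := [1, 2, 4]

def Spec_level_safe (level : List Int) (out : Bool) : Prop := out = level_safe_alt level
instance (level : List Int) (out : Bool) : Decidable (Spec_level_safe level out) := by unfold Spec_level_safe; infer_instance

-- ===== CLAIM (what is proved, stated in full; the proofs are below) =====
def Claim_equal_level_safe : Prop := ∀ (level : List Int), Dom_level_safe level → Pre_level_safe level → Spec_level_safe level (level_safe level)

-- ===== LEMMAS AND PROOFS =====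

-- the loop equals the uniform scan over the difference table of current :: rest
theorem levelSafeLoop_eq (inc : Bool) (rest : List Int) : ∀ (c : Int),
    levelSafeLoop inc c rest =
      (((c :: rest).zip rest).map (fun p => p.2 - p.1)).all
        (fun d => if inc then decide (1 ≤ d ∧ d ≤ 3) else decide (-3 ≤ d ∧ d ≤ -1)) := by
  induction rest with
  | nil => intro c; simp [levelSafeLoop]
  | cons x xs ih =>
    intro c
    have hzip : ((c :: x :: xs).zip (x :: xs)) = (c, x) :: ((x :: xs).zip xs) := rfl
    rw [hzip]
    simp only [List.map_cons, List.all_cons]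
    rw [← ih x]
    cases inc with
    | true =>
      by_cases h1 : c > x
      · simp [levelSafeLoop, h1]
        intro hA _
        omega
      · by_cases h2 : (x - c).natAbs = 0 ∨ (x - c).natAbs > 3
        · simp [levelSafeLoop, h1]
          cases hL : levelSafeLoop true x xs
          · simp
          · rw [Bool.eq_iff_iff]
            simp only [Bool.and_true, Bool.and_eq_true, Bool.not_eq_true', decide_eq_true_eq, decide_eq_false_iff_not]
            omega
        · simp [levelSafeLoop, h1]
          cases hL : levelSafeLoop true x xs
          · simp
          · rw [Bool.eq_iff_iff]
            simp only [Bool.and_true, Bool.and_eq_true, Bool.not_eq_true', decide_eq_true_eq, decide_eq_false_iff_not]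
            omega
    | false =>
      by_cases h1 : c < x
      · simp [levelSafeLoop, h1]
        intro hA _
        omega
      · by_cases h2 : (c - x).natAbs = 0 ∨ (c - x).natAbs > 3
        · simp [levelSafeLoop, h1]
          cases hL : levelSafeLoop false x xs
          · simp
          · rw [Bool.eq_iff_iff]
            simp only [Bool.and_true, Bool.and_eq_true, Bool.not_eq_true', decide_eq_true_eq, decide_eq_false_iff_not]
            omega
        · simp [levelSafeLoop, h1]
          cases hL : levelSafeLoop false x xs
          · simp
          · rw [Bool.eq_iff_iff]
            simp only [Bool.and_true, Bool.and_eq_true, Bool.not_eq_true', decide_eq_true_eq, decide_eq_false_iff_not]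
            omega

-- ===== VERDICT (by name: the statement is the Claim_ definition above) =====
theorem level_safe_spec : Claim_equal_level_safe := by
  intro level _ hpre
  unfold Spec_level_safe
  match level with
  | [] => simp [Pre_level_safe] at hpre
  | [a] => simp [Pre_level_safe] at hpre
  | a :: b :: rest =>
    show level_safe (a :: b :: rest) = level_safe_alt (a :: b :: rest)
    simp only [level_safe, level_safe_alt, List.tail_cons]
    rw [levelSafeLoop_eq]
    by_cases h : a < b <;> simp [h]
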